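-- pv_equiv track=rewrite | github.com/Haksell/codeforces | 1762C.py | f
-- ===== SOURCE A (Python) =====
-- from itertools import product
--
-- def f(s):
--     extension = [""] * (2 * len(s) - 1)
--     for i, c in enumerate(s):
--         extension[i << 1] = c
--     ans = 0
--     for l in product("01", repeat=len(s) - 1):
--         for i, b in enumerate(l):
--             extension[2 * i + 1] = b
--         o = z = 0
--         for i, c in enumerate(extension):
--             o += c == "0"
--             z += c == "1"
--             if i & 1 == 0 and ((c == "0" and o < z) or (c == "1" and z < o)):
--                 break
--         else:
--             ans += 1
--     return ans
-- ===== SOURCE B (Python) =====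
-- def _spread(dp):
--     # insert one free bit: each balance d branches to d+1 ('0') and d-1 ('1')
--     nd = {}
--     for d, cnt in dp.items():
--         nd[d + 1] = nd.get(d + 1, 0) + cnt
--         nd[d - 1] = nd.get(d - 1, 0) + cnt
--     return nd
--
-- def _stepc(dp, c):
--     # consume a fixed character, dropping balances that violate the prefix test
--     nd = {}
--     for d, cnt in dp.items():
--         d2 = d + (c == "0") - (c == "1")
--         if (c == "0" and d2 < 0) or (c == "1" and d2 > 0):
--             continue
--         nd[d2] = nd.get(d2, 0) + cnt
--     return nd
--
-- def f(s):
--     dp = {0: 1}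
--     for i, c in enumerate(s):
--         if i:
--             dp = _spread(dp)
--         dp = _stepc(dp, c)
--     return sum(dp.values())
-- ===== Notes on version B (the rewrite author's own statement) =====
-- stated objective: faster
-- what changed: A enumerates all 2^(n-1) assignments of the inserted bits and re-scans the whole extension for each; B runs a single left-to-right dynamic program over a dict mapping the running balance (#'0'-#'1') to the number of surviving bit-insertions, counting all completions at once.
import Mathlib
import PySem

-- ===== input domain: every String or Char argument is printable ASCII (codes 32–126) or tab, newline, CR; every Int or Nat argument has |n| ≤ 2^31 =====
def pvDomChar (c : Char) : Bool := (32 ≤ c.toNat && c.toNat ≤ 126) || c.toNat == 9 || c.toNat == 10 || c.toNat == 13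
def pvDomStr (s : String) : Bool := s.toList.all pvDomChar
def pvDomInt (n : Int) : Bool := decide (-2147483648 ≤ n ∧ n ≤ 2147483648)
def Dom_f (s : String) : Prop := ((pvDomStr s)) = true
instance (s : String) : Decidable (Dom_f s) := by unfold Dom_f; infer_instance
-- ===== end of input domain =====

-- B replaces A's enumeration of all 2^(n-1) bit insertions by a dict-based DP over the
-- running balance that counts all completions at once.

-- ===== PORT A =====
-- itertools.product("01", repeat=k), in CPython's order (hand-ported helper; exact)
def prod01 : Nat → List (List String)
  | 0 => [[]]
  | k+1 => (["0", "1"] : List String).flatMap (fun b => (prod01 k).map (fun t => b :: t))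

-- the inner 'for i, c in enumerate(extension): … break / else' scan
def checkLoop : List (Int × String) → Int → Int → Bool
  | [], _, _ => true
  | (i, c) :: rest, o, z =>
    let o := o + (if c == "0" then 1 else 0)
    let z := z + (if c == "1" then 1 else 0)
    if PySem.Int.band i 1 == 0 && ((c == "0" && decide (o < z)) || (c == "1" && decide (z < o))) then false
    else checkLoop rest o z

def f (s : String) : Int :=
  let chars := s.toList
  let ext0 : List String := PySem.List.pyRepeat [""] (2 * (chars.length : Int) - 1)
  let ext1 := (PySem.List.enumerate chars 0).foldl
      (fun (e : List String) (p : Int × Char) => PySem.List.pySetD e (p.1 <<< (1 : Nat)) (String.ofList [p.2])) ext0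
  (prod01 (chars.length - 1)).foldl (fun ans l =>
    let ext2 := (PySem.List.enumerate l 0).foldl
      (fun e p => PySem.List.pySetD e (2 * p.1 + 1) p.2) ext1
    if checkLoop (PySem.List.enumerate ext2 0) 0 0 then ans + 1 else ans) 0

-- ===== PORT B =====
def spreadD (dp : PySem.Dict Int Int) : PySem.Dict Int Int :=
  dp.items.foldl (fun nd p =>
    let nd := nd.insert (p.1 + 1) (nd.getD (p.1 + 1) 0 + p.2)
    nd.insert (p.1 - 1) (nd.getD (p.1 - 1) 0 + p.2)) PySem.Dict.empty

def stepcD (dp : PySem.Dict Int Int) (c : Char) : PySem.Dict Int Int :=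
  dp.items.foldl (fun nd p =>
    let d2 := p.1 + (if c == '0' then 1 else 0) - (if c == '1' then 1 else 0)
    if (c == '0' && decide (d2 < 0)) || (c == '1' && decide (0 < d2)) then nd
    else nd.insert d2 (nd.getD d2 0 + p.2)) PySem.Dict.empty

def f_alt (s : String) : Int :=
  let dp := (PySem.List.enumerate s.toList 0).foldl
      (fun dp p => stepcD (if p.1 == 0 then dp else spreadD dp) p.2)
      (PySem.Dict.empty.insert 0 1)
  dp.values.sum

-- ===== PRECONDITION & SPEC =====
-- Pre_ excludes only the empty string, on which A raises ValueError (product(…, repeat=-1)).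
def Pre_f (s : String) : Prop := s ≠ ""
instance (s : String) : Decidable (Pre_f s) := by unfold Pre_f; infer_instance
def pvWitness_f : String := "0a1"

def Spec_f (s : String) (out : Int) : Prop := out = f_alt s
instance (s : String) (out : Int) : Decidable (Spec_f s out) := by unfold Spec_f; infer_instance

-- ===== CLAIM (what is proved, stated in full; the proofs are below) =====
def Claim_equal_f : Prop := ∀ (s : String), Dom_f s → Pre_f s → Spec_f s (f s)

-- ===== LEMMAS AND PROOFS =====

-- balance update / prefix-violation test for one original character
def cupd (c : Char) (d : Int) : Int := d + (if c == '0' then 1 else 0) - (if c == '1' then 1 else 0)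
def cbad (c : Char) (d : Int) : Bool := (c == '0' && decide (d < 0)) || (c == '1' && decide (0 < d))
-- balance update for one inserted-bit string
def bupd (b : String) (d : Int) : Int := d + (if b == "0" then 1 else 0) - (if b == "1" then 1 else 0)

-- intended count of valid completions: one free bit before each remaining character
def cnt : List Char → Int → Int
  | [], _ => 1
  | c :: cs, d =>
      (if cbad c (cupd c (d+1)) then 0 else cnt cs (cupd c (d+1)))
    + (if cbad c (cupd c (d-1)) then 0 else cnt cs (cupd c (d-1)))

-- the common value both programs compute
def F : List Char → Int
  | [] => 1
  | c :: rest => if cbad c (cupd c 0) then 0 else cnt rest (cupd c 0)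

-- sequential validity of one completion (bit before each character)
def sim : List Char → List String → Int → Bool
  | [], _, _ => true
  | _ :: _, [], _ => true
  | c :: cs, b :: bs, d =>
      let d2 := cupd c (bupd b d)
      !cbad c d2 && sim cs bs d2

-- checkLoop with the two counters fused into their difference
def checkD : List (Int × String) → Int → Bool
  | [], _ => true
  | (i, c) :: rest, d =>
    let d := d + (if c == "0" then 1 else 0) - (if c == "1" then 1 else 0)
    if PySem.Int.band i 1 == 0 && ((c == "0" && decide (d < 0)) || (c == "1" && decide (0 < d))) then false
    else checkD rest d

-- the fully assigned extension list after the first character: bit, char, bit, char, …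
def interB : List String → List Char → List String
  | [], _ => []
  | b :: _, [] => [b]
  | b :: bs, c :: cs => b :: String.ofList [c] :: interB bs cs

-- Σ v·h(k) over an association list
def sumI (t : List (Int × Int)) (h : Int → Int) : Int := (t.map (fun p => p.2 * h p.1)).sum

lemma ofList_beq (c c' : Char) : (String.ofList [c] == String.ofList [c']) = (c == c') := by
  rcases Decidable.eq_or_ne c c' with h | h
  · subst h; simp
  · have : String.ofList [c] ≠ String.ofList [c'] := by
      intro hh; exact h (by simpa using congrArg String.toList hh)
    simp [this, h]

lemma checkLoop_eq_checkD (L : List (Int × String)) : ∀ (o z : Int),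
    checkLoop L o z = checkD L (o - z) := by
  induction L with
  | nil => intro o z; rfl
  | cons p rest ih =>
    obtain ⟨i, c⟩ := p
    intro o z
    simp only [checkLoop, checkD]
    have e1 : ((o + (if c == "0" then (1:Int) else 0)) < (z + (if c == "1" then (1:Int) else 0)))
        ↔ ((o - z + (if c == "0" then (1:Int) else 0) - (if c == "1" then (1:Int) else 0)) < 0) := by
      omega
    have e2 : ((z + (if c == "1" then (1:Int) else 0)) < (o + (if c == "0" then (1:Int) else 0)))
        ↔ ((0:Int) < (o - z + (if c == "0" then (1:Int) else 0) - (if c == "1" then (1:Int) else 0))) := by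
      omega
    have e3 : (o + (if c == "0" then (1:Int) else 0)) - (z + (if c == "1" then (1:Int) else 0))
        = o - z + (if c == "0" then (1:Int) else 0) - (if c == "1" then (1:Int) else 0) := by
      omega
    rw [decide_eq_decide.mpr e1, decide_eq_decide.mpr e2, ih, e3]

lemma band_even (k : Nat) : (PySem.Int.band (2*(k:Int)) 1 == 0) = true := by
  have : (2*(k:Int)) = ((2*k : Nat) : Int) := by push_cast; ring
  rw [this, show ((1:Int)) = ((1:Nat):Int) from rfl, PySem.Int.band_natCast]
  simp [Nat.and_one_is_mod, Nat.mul_mod_right]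

lemma band_odd (k : Nat) : (PySem.Int.band (2*(k:Int)+1) 1 == 0) = false := by
  have : (2*(k:Int)+1) = ((2*k+1 : Nat) : Int) := by push_cast; ring
  rw [this, show ((1:Int)) = ((1:Nat):Int) from rfl, PySem.Int.band_natCast]
  simp [Nat.and_one_is_mod]

lemma beq_zero (c : Char) : (String.ofList [c] == "0") = (c == '0') := by
  rw [show (("0":String)) = String.ofList ['0'] from rfl]; exact ofList_beq c '0'

lemma beq_one (c : Char) : (String.ofList [c] == "1") = (c == '1') := by
  rw [show (("1":String)) = String.ofList ['1'] from rfl]; exact ofList_beq c '1'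

lemma checkD_interB : ∀ (bs : List String) (cs : List Char) (k : Nat) (d : Int),
    bs.length = cs.length →
    checkD (PySem.List.enumerate (interB bs cs) (2*(k:Int)+1)) d = sim cs bs d := by
  intro bs
  induction bs with
  | nil =>
    intro cs k d hlen
    cases cs with
    | nil => rfl
    | cons c cs => simp at hlen
  | cons b bs ih =>
    intro cs k d hlen
    cases cs with
    | nil => simp at hlen
    | cons c cs =>
      simp only [List.length_cons, Nat.add_right_cancel_iff] at hlen
      simp only [interB, PySem.List.enumerate_cons, checkD, band_odd k, Bool.false_and,
        if_neg (by simp : ¬((false : Bool) = true))]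
      have h2 : (2*(k:Int)+1)+1 = 2*((k+1 : Nat):Int) := by push_cast; ring
      rw [h2, band_even (k+1)]
      simp only [beq_zero, beq_one, Bool.true_and]
      show (if (cbad c (cupd c (bupd b d)) = true) then false
            else checkD (PySem.List.enumerate (interB bs cs) (2*((k+1:Nat):Int)+1)) (cupd c (bupd b d)))
          = sim (c :: cs) (b :: bs) d
      rw [ih cs (k+1) (cupd c (bupd b d)) hlen]
      simp only [sim]
      cases hcb : cbad c (cupd c (bupd b d)) <;> simp

lemma chk_eq (c : Char) (cs : List Char) (l : List String) (h : l.length = cs.length) :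
    checkLoop (PySem.List.enumerate (String.ofList [c] :: interB l cs) 0) 0 0
      = (!cbad c (cupd c 0) && sim cs l (cupd c 0)) := by
  rw [checkLoop_eq_checkD]
  norm_num
  simp only [checkD, beq_zero, beq_one,
    show (PySem.Int.band 0 1 == 0) = true from by decide, Bool.true_and]
  rw [show PySem.List.enumerate (interB l cs) 1
        = PySem.List.enumerate (interB l cs) (2*((0:Nat):Int)+1) from by norm_num,
      checkD_interB l cs 0 _ h]
  show (if (cbad c ((0:Int) + _ - _) = true) then false else sim cs l (cupd c 0)) = _
  have h2 : ((0:Int) + (if c == '0' then (1:Int) else 0) - (if c == '1' then (1:Int) else 0)) = cupd c 0 := rfl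
  rw [h2]
  cases hcb : cbad c (cupd c 0) <;> simp

lemma foldl_setOdd_shift : ∀ (l : List String) (k : Nat) (u v : String) (e : List String),
    (PySem.List.enumerate l ((k:Int)+1)).foldl
        (fun E p => PySem.List.pySetD E (2 * p.1 + 1) p.2) (u :: v :: e)
    = u :: v :: (PySem.List.enumerate l (k:Int)).foldl
        (fun E p => PySem.List.pySetD E (2 * p.1 + 1) p.2) e := by
  intro l
  induction l with
  | nil => intro k u v e; rfl
  | cons b l ih =>
    intro k u v e
    simp only [PySem.List.enumerate_cons, List.foldl_cons]
    rw [show (2 * ((k:Int)+1) + 1) = ((2*k+1+1+1 : Nat) : Int) from by push_cast; ring,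
        PySem.List.pySetD_natCast, List.set_cons_succ, List.set_cons_succ,
        show ((k:Int)+1+1) = (((k+1:Nat):Int)+1) from by push_cast; ring, ih,
        show (2 * ((k:Int)) + 1) = ((2*k+1 : Nat) : Int) from by push_cast; ring,
        PySem.List.pySetD_natCast]
    norm_cast

lemma foldl_setEven_shift : ∀ (l : List Char) (k : Nat) (u v : String) (e : List String),
    (PySem.List.enumerate l ((k:Int)+1)).foldl
        (fun (E : List String) (p : Int × Char) => PySem.List.pySetD E (p.1 <<< (1 : Nat)) (String.ofList [p.2])) (u :: v :: e)
    = u :: v :: (PySem.List.enumerate l (k:Int)).foldl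
        (fun (E : List String) (p : Int × Char) => PySem.List.pySetD E (p.1 <<< (1 : Nat)) (String.ofList [p.2])) e := by
  intro l
  induction l with
  | nil => intro k u v e; rfl
  | cons c l ih =>
    intro k u v e
    simp only [PySem.List.enumerate_cons, List.foldl_cons]
    rw [show (((k:Int)+1) <<< (1:Nat)) = ((2*k+2 : Nat) : Int) from by
          rw [Int.shiftLeft_eq]; push_cast; ring,
        show ((2*k+2 : Nat) : Int) = ((2*k+1+1 : Nat) : Int) from by omega,
        PySem.List.pySetD_natCast, List.set_cons_succ, List.set_cons_succ,
        show ((k:Int)+1+1) = (((k+1:Nat):Int)+1) from by push_cast; ring, ih,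
        show (((k:Int)) <<< (1:Nat)) = ((2*k : Nat) : Int) from by
          rw [Int.shiftLeft_eq]; push_cast; ring,
        PySem.List.pySetD_natCast]
    norm_cast

lemma setOdds_interB : ∀ (cs : List Char) (bs l : List String) (x : String),
    bs.length = cs.length → l.length = cs.length →
    (PySem.List.enumerate l 0).foldl
        (fun E p => PySem.List.pySetD E (2 * p.1 + 1) p.2) (x :: interB bs cs)
    = x :: interB l cs := by
  intro cs
  induction cs with
  | nil =>
    intro bs l x hb hl
    rw [List.length_eq_zero_iff.mp hl]
    cases bs with
    | nil => rfl
    | cons b bs => simp at hb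
  | cons c cs ih =>
    intro bs l x hb hl
    cases bs with
    | nil => simp at hb
    | cons b0 bs =>
      cases l with
      | nil => simp at hl
      | cons b l =>
        simp only [List.length_cons, Nat.add_right_cancel_iff] at hb hl
        simp only [interB, PySem.List.enumerate_cons, List.foldl_cons]
        rw [show ((2 * (0:Int) + 1)) = ((1:Nat):Int) from by norm_num,
            PySem.List.pySetD_natCast, List.set_cons_succ, List.set_cons_zero,
            show ((0:Int)+1) = (((0:Nat):Int)+1) from by norm_num,
            foldl_setOdd_shift l 0 x b (String.ofList [c] :: interB bs cs),
            show (((0:Nat)):Int) = (0:Int) from rfl,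
            ih bs l (String.ofList [c]) hb hl]

lemma setEvens : ∀ (cs : List Char) (c : Char),
    (PySem.List.enumerate (c :: cs) 0).foldl
        (fun (E : List String) (p : Int × Char) => PySem.List.pySetD E (p.1 <<< (1 : Nat)) (String.ofList [p.2]))
        (List.replicate (2*(cs.length+1) - 1) "")
    = String.ofList [c] :: interB (List.replicate cs.length "") cs := by
  intro cs
  induction cs with
  | nil =>
    intro c
    simp only [PySem.List.enumerate_cons, PySem.List.enumerate_nil, List.foldl_cons,
      List.foldl_nil, List.length_nil, List.replicate]
    rfl
  | cons c1 cs ih =>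
    intro c
    have hrep : List.replicate (2*(cs.length+1+1) - 1) ""
        = "" :: "" :: List.replicate (2*(cs.length+1) - 1) "" := by
      rw [show 2*(cs.length+1+1) - 1 = ((2*(cs.length+1) - 1) + 1) + 1 from by omega]
      simp [List.replicate]
    simp only [List.length_cons, hrep]
    rw [PySem.List.enumerate_cons, List.foldl_cons]
    rw [show (((0:Int)) <<< (1:Nat)) = ((0:Nat):Int) from by decide,
        PySem.List.pySetD_natCast, List.set_cons_zero,
        show ((0:Int)+1) = (((0:Nat):Int)+1) from by norm_num,
        foldl_setEven_shift (c1 :: cs) 0 (String.ofList [c]) ""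
          (List.replicate (2*(cs.length+1) - 1) ""),
        show (((0:Nat)):Int) = (0:Int) from rfl, ih c1]
    simp [interB, List.replicate]

lemma prod01_length : ∀ (k : Nat) (l : List String), l ∈ prod01 k → l.length = k := by
  intro k
  induction k with
  | zero => intro l hl; simp [prod01] at hl; simp [hl]
  | succ k ih =>
    intro l hl
    simp only [prod01, List.mem_flatMap, List.mem_map] at hl
    obtain ⟨b, _, t, ht, rfl⟩ := hl
    simp [ih t ht]

lemma countP_sim : ∀ (cs : List Char) (d : Int),
    ((prod01 cs.length).countP (fun l => sim cs l d) : Int) = cnt cs d := by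
  intro cs
  induction cs with
  | nil => intro d; simp [prod01, sim, cnt]
  | cons c cs ih =>
    intro d
    have hb0 : bupd "0" d = d + 1 := by simp [bupd]
    have hb1 : bupd "1" d = d - 1 := by simp [bupd]
    have h0 : ((fun l => sim (c :: cs) l d) ∘ (fun t => "0" :: t))
        = fun t => !cbad c (cupd c (d+1)) && sim cs t (cupd c (d+1)) := by
      funext t; simp only [Function.comp_apply, sim, hb0]
    have h1 : ((fun l => sim (c :: cs) l d) ∘ (fun t => "1" :: t))
        = fun t => !cbad c (cupd c (d-1)) && sim cs t (cupd c (d-1)) := by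
      funext t; simp only [Function.comp_apply, sim, hb1]
    simp only [List.length_cons, prod01, List.flatMap_cons, List.flatMap_nil, List.append_nil,
      List.countP_append, List.countP_map, h0, h1]
    by_cases hb : cbad c (cupd c (d+1)) <;> by_cases hb' : cbad c (cupd c (d-1)) <;>
      simp [hb, hb', cnt, ← ih] <;> first | (push_cast; ring) | skip

lemma f_eq_F (s : String) (h : s.toList ≠ []) : f s = F s.toList := by
  obtain ⟨c, cs, hcs⟩ : ∃ c cs, s.toList = c :: cs := by
    cases hh : s.toList with
    | nil => exact absurd hh h
    | cons a l => exact ⟨a, l, rfl⟩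
  simp only [f]
  rw [hcs, PySem.List.pyRepeat_singleton]
  rw [show ((2 * (((c :: cs).length : Nat) : Int) - 1)).toNat = 2*(cs.length+1) - 1 from by
        simp only [List.length_cons]; omega,
      setEvens cs c,
      show (c :: cs).length - 1 = cs.length from by simp]
  rw [PySem.List.foldl_congr_mem (prod01 cs.length) _
        (fun ans l => if (!cbad c (cupd c 0) && sim cs l (cupd c 0)) then ans + 1 else ans) 0
        (by
          intro acc l hl
          have hll := prod01_length cs.length l hl
          rw [setOdds_interB cs (List.replicate cs.length "") l _ (by simp) hll,
              chk_eq c cs l hll])]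
  rw [PySem.List.foldl_count_if]
  by_cases hb : cbad c (cupd c 0)
  · simp [hb, F]
  · simp [hb, F, countP_sim]

lemma sumI_replace : ∀ (t : List (Int × Int)) (k a v : Int) (h : Int → Int),
    (t.map Prod.fst).Nodup → (k, a) ∈ t →
    sumI (t.map (fun p => if p.1 == k then (k, a + v) else p)) h = sumI t h + v * h k := by
  intro t
  induction t with
  | nil => intro k a v h hn hm; simp at hm
  | cons q t ih =>
    intro k a v h hn hm
    simp only [List.map_cons, List.nodup_cons] at hn
    rcases List.mem_cons.mp hm with rfl | hmt
    · have hrest : ∀ p ∈ t, (if p.1 == k then ((k, a + v) : Int × Int) else p) = p := by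
        intro p hp
        apply if_neg
        simp only [beq_iff_eq]
        intro hpk
        exact hn.1 (by rw [← hpk]; exact List.mem_map.mpr ⟨p, hp, rfl⟩)
      simp only [sumI, List.map_cons, List.sum_cons, List.map_congr_left hrest,
        List.map_id']
      simp only [beq_self_eq_true, if_pos]
      ring
    · have hq : (q.1 == k) = false := by
        simp only [beq_eq_false_iff_ne, ne_eq]
        intro hqk
        exact hn.1 (by rw [hqk]; exact List.mem_map.mpr ⟨(k, a), hmt, rfl⟩)
      simp only [sumI, List.map_cons, List.sum_cons, hq, Bool.false_eq_true, if_false]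
      have := ih k a v h hn.2 hmt
      simp only [sumI] at this
      rw [this]
      ring

lemma sumI_insert_add (nd : PySem.Dict Int Int) (k v : Int) (h : Int → Int)
    (hn : nd.keys.Nodup) :
    sumI (nd.insert k (nd.getD k 0 + v)).items h = sumI nd.items h + v * h k := by
  have hkeys : nd.keys = nd.items.map Prod.fst := rfl
  cases hc : nd.contains k with
  | false =>
    rw [PySem.Dict.items_insert_of_not_contains nd _ hc,
        PySem.Dict.getD_of_not_contains nd 0 hc]
    simp [sumI]
  | true =>
    have hk : k ∈ nd.items.map Prod.fst := by
      rw [← hkeys]; exact (PySem.Dict.contains_iff_mem_keys nd k).mp hc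
    obtain ⟨p, hp, hp1⟩ := List.mem_map.mp hk
    obtain ⟨k', a⟩ := p
    cases hp1
    have hga : nd.getD k' 0 = a := PySem.Dict.getD_of_mem_items nd hp hn 0
    rw [PySem.Dict.items_insert_of_contains nd _ hc, hga]
    exact sumI_replace nd.items k' a v h (hkeys ▸ hn) hp

lemma spread_fold_sum (h : Int → Int) : ∀ (t : List (Int × Int)) (nd : PySem.Dict Int Int), nd.keys.Nodup →
    sumI ((t.foldl (fun nd p =>
      let nd := nd.insert (p.1 + 1) (nd.getD (p.1 + 1) 0 + p.2)
      nd.insert (p.1 - 1) (nd.getD (p.1 - 1) 0 + p.2)) nd).items) h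
    = sumI nd.items h + (t.map (fun p => p.2 * (h (p.1+1) + h (p.1-1)))).sum := by
  intro t
  induction t with
  | nil => intro nd hn; simp
  | cons p t ih =>
    intro nd hn
    simp only [List.foldl_cons, List.map_cons, List.sum_cons]
    rw [ih _ (PySem.Dict.nodup_keys_insert _ _ _ (PySem.Dict.nodup_keys_insert _ _ _ hn)),
        sumI_insert_add _ _ _ _ (PySem.Dict.nodup_keys_insert _ _ _ hn),
        sumI_insert_add _ _ _ _ hn]
    ring

lemma stepc_fold_sum (c : Char) (h : Int → Int) : ∀ (t : List (Int × Int)) (nd : PySem.Dict Int Int), nd.keys.Nodup →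
    sumI ((t.foldl (fun nd p =>
      let d2 := p.1 + (if c == '0' then 1 else 0) - (if c == '1' then 1 else 0)
      if (c == '0' && decide (d2 < 0)) || (c == '1' && decide (0 < d2)) then nd
      else nd.insert d2 (nd.getD d2 0 + p.2)) nd).items) h
    = sumI nd.items h
      + (t.map (fun p => p.2 * (if cbad c (cupd c p.1) then 0 else h (cupd c p.1)))).sum := by
  rw [show (fun (nd : PySem.Dict Int Int) (p : Int × Int) =>
        let d2 := p.1 + (if c == '0' then (1:Int) else 0) - (if c == '1' then (1:Int) else 0)
        if (c == '0' && decide (d2 < 0)) || (c == '1' && decide (0 < d2)) then nd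
        else nd.insert d2 (nd.getD d2 0 + p.2))
      = (fun (nd : PySem.Dict Int Int) (p : Int × Int) =>
        if cbad c (cupd c p.1) then nd
        else nd.insert (cupd c p.1) (nd.getD (cupd c p.1) 0 + p.2)) from rfl]
  intro t
  induction t with
  | nil => intro nd hn; simp
  | cons p t ih =>
    intro nd hn
    simp only [List.foldl_cons, List.map_cons, List.sum_cons]
    by_cases hcd : cbad c (cupd c p.1) = true
    · rw [if_pos hcd, ih _ hn, hcd]
      simp
    · rw [if_neg hcd, ih _ (PySem.Dict.nodup_keys_insert _ _ _ hn),
          sumI_insert_add _ _ _ _ hn, eq_false_of_ne_true hcd]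
      simp only [if_false, Bool.false_eq_true]
      ring

lemma spreadD_sum (dp : PySem.Dict Int Int) (h : Int → Int) :
    sumI (spreadD dp).items h = sumI dp.items (fun d => h (d+1) + h (d-1)) := by
  simp only [spreadD]
  rw [spread_fold_sum h dp.items PySem.Dict.empty PySem.Dict.nodup_keys_empty]
  simp [sumI, show (PySem.Dict.empty : PySem.Dict Int Int).items = ([] : List (Int × Int)) from rfl]

lemma stepcD_sum (dp : PySem.Dict Int Int) (c : Char) (h : Int → Int) :
    sumI (stepcD dp c).items h
      = sumI dp.items (fun d => if cbad c (cupd c d) then 0 else h (cupd c d)) := by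
  simp only [stepcD]
  rw [stepc_fold_sum c h dp.items PySem.Dict.empty PySem.Dict.nodup_keys_empty]
  simp [sumI, show (PySem.Dict.empty : PySem.Dict Int Int).items = ([] : List (Int × Int)) from rfl]

lemma loopB_sum : ∀ (cs : List Char) (dp : PySem.Dict Int Int),
    (cs.foldl (fun dp c => stepcD (spreadD dp) c) dp).values.sum = sumI dp.items (cnt cs) := by
  intro cs
  induction cs with
  | nil =>
    intro dp
    have hv : dp.values = dp.items.map Prod.snd := rfl
    simp only [List.foldl_nil, hv]
    simp [sumI, cnt]
  | cons c cs ih =>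
    intro dp
    simp only [List.foldl_cons]
    rw [ih, stepcD_sum, spreadD_sum]
    simp only [sumI]
    apply congrArg
    apply List.map_congr_left
    intro p _
    simp [cnt]

lemma fold_enum_ge1 : ∀ (cs : List Char) (k : Nat) (dp : PySem.Dict Int Int),
    (PySem.List.enumerate cs ((k:Int)+1)).foldl
        (fun dp p => stepcD (if p.1 == 0 then dp else spreadD dp) p.2) dp
    = cs.foldl (fun dp c => stepcD (spreadD dp) c) dp := by
  intro cs
  induction cs with
  | nil => intro k dp; rfl
  | cons c cs ih =>
    intro k dp
    simp only [PySem.List.enumerate_cons, List.foldl_cons]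
    rw [show (((k:Int)+1) == 0) = false from beq_eq_false_iff_ne.mpr (by omega)]
    simp only [Bool.false_eq_true, if_false]
    rw [show ((k:Int)+1+1) = (((k+1:Nat):Int)+1) from by push_cast; ring, ih]

lemma f_alt_eq_F (s : String) (h : s.toList ≠ []) : f_alt s = F s.toList := by
  obtain ⟨c, cs, hcs⟩ : ∃ c cs, s.toList = c :: cs := by
    cases hh : s.toList with
    | nil => exact absurd hh h
    | cons a l => exact ⟨a, l, rfl⟩
  simp only [f_alt]
  rw [hcs, PySem.List.enumerate_cons, List.foldl_cons]
  simp only [show (((0:Int)) == 0) = true from rfl, if_true]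
  rw [show ((0:Int)+1) = (((0:Nat):Int)+1) from by norm_num, fold_enum_ge1 cs 0,
      loopB_sum cs, stepcD_sum,
      show (PySem.Dict.empty.insert (0:Int) (1:Int)).items = [((0:Int),(1:Int))] from rfl]
  simp [sumI, F]

-- ===== VERDICT (by name: the statement is the Claim_ definition above) =====
theorem f_spec : Claim_equal_f := by
  intro s _ hpre
  have h : s.toList ≠ [] := by
    intro hh
    exact hpre (by simpa using congrArg String.ofList hh)
  unfold Spec_f
  rw [f_eq_F s h, f_alt_eq_F s h]
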